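-- pv_equiv track=rewrite | github.com/brzgr/fun_QA | src/utils.py | slice_corpus_generator
-- ===== SOURCE A (Python) =====
-- def slice_corpus_generator(corpus: str, chunk_size: int = 256, num_chunks: int = 10):
--     split_corpus = corpus.split()
--     chunks = []
--     counter = 0
--     for i in range(0, len(split_corpus), chunk_size):
--         chunk = " ".join(split_corpus[i : i + chunk_size])
--         chunks.append(chunk)
--         counter += 1
--         if counter == num_chunks:
--             yield chunks
--             counter = 0
--             chunks = []
-- ===== SOURCE B (Python) =====
-- def slice_corpus_generator(corpus: str, chunk_size: int = 256, num_chunks: int = 10):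
--     words = corpus.split()
--     chunks = [" ".join(words[i:i + chunk_size]) for i in range(0, len(words), chunk_size)]
--     if num_chunks > 0:
--         n = len(chunks)
--         for j in range(0, n - n % num_chunks, num_chunks):
--             yield chunks[j:j + num_chunks]
-- ===== Notes on version B (the rewrite author's own statement) =====
-- stated objective: simpler
-- what changed: A's single stateful loop with a counter and two mutable accumulators is replaced by two declarative passes: a comprehension materializing all chunk strings, then slicing that list into fixed-size batches over a stride range that arithmetically drops the trailing partial batch.
import Mathlib
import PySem

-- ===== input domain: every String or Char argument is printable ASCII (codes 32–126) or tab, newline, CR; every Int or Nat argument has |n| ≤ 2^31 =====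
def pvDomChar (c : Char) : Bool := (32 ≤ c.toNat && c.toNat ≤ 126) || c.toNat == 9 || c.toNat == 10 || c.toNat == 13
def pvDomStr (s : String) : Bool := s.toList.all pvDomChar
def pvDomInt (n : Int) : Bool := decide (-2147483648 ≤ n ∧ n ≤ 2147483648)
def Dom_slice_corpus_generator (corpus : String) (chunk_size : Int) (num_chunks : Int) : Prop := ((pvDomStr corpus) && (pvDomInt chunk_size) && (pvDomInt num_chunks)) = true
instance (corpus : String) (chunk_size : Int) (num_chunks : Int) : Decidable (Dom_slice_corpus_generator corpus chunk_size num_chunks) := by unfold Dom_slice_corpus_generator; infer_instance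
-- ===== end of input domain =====

-- B replaces A's stateful counter/accumulator loop by two declarative passes (materialize
-- all chunk strings, then slice fixed-size batches); the generators' yielded batches are
-- ported as the returned list of batches.

-- ===== PORT A =====
def slice_corpus_generator (corpus : String) (chunk_size : Int) (num_chunks : Int) : List (List String) :=
  let split_corpus := PySem.Str.split₀ corpus
  let st := (PySem.List.pyRange 0 (split_corpus.length : Int) chunk_size).foldl
    (fun st i =>
      let chunk := PySem.Str.join " " (PySem.List.slice split_corpus (some i) (some (i + chunk_size)))
      let chunks := st.1 ++ [chunk]
      let counter := st.2.1 + 1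
      if counter = num_chunks then (([] : List String), (0 : Int), st.2.2 ++ [chunks])
      else (chunks, counter, st.2.2))
    (([] : List String), (0 : Int), ([] : List (List String)))
  st.2.2

-- ===== PORT B =====
def slice_corpus_generator_alt (corpus : String) (chunk_size : Int) (num_chunks : Int) : List (List String) :=
  let words := PySem.Str.split₀ corpus
  let chunks := (PySem.List.pyRange 0 (words.length : Int) chunk_size).map
    (fun i => PySem.Str.join " " (PySem.List.slice words (some i) (some (i + chunk_size))))
  if num_chunks > 0 then
    let n : Int := (chunks.length : Int)
    (PySem.List.pyRange 0 (n - PySem.Int.mod n num_chunks) num_chunks).map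
      (fun j => PySem.List.slice chunks (some j) (some (j + num_chunks)))
  else []

-- ===== PRECONDITION & SPEC =====
-- Pre_ excludes exactly chunk_size = 0, where Python's range(0, len, 0) raises ValueError in A (and in B).
def Pre_slice_corpus_generator (corpus : String) (chunk_size : Int) (num_chunks : Int) : Prop :=
  chunk_size ≠ 0
instance (corpus : String) (chunk_size : Int) (num_chunks : Int) : Decidable (Pre_slice_corpus_generator corpus chunk_size num_chunks) := by unfold Pre_slice_corpus_generator; infer_instance
def pvWitness_slice_corpus_generator : String × Int × Int := ("hello brave new world", 2, 1)
def Spec_slice_corpus_generator (corpus : String) (chunk_size : Int) (num_chunks : Int) (out : List (List String)) : Prop := out = slice_corpus_generator_alt corpus chunk_size num_chunks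
instance (corpus : String) (chunk_size : Int) (num_chunks : Int) (out : List (List String)) : Decidable (Spec_slice_corpus_generator corpus chunk_size num_chunks out) := by unfold Spec_slice_corpus_generator; infer_instance

-- ===== CLAIM (what is proved, stated in full; the proofs are below) =====
def Claim_equal_slice_corpus_generator : Prop := ∀ (corpus : String) (chunk_size : Int) (num_chunks : Int), Dom_slice_corpus_generator corpus chunk_size num_chunks → Pre_slice_corpus_generator corpus chunk_size num_chunks → Spec_slice_corpus_generator corpus chunk_size num_chunks (slice_corpus_generator corpus chunk_size num_chunks)

-- ===== LEMMAS AND PROOFS =====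

-- A's loop body, with the chunk string abstracted out.
def pvStep (k : Int) (st : List String × Int × List (List String)) (c : String) :
    List String × Int × List (List String) :=
  if st.2.1 + 1 = k then (([] : List String), (0 : Int), st.2.2 ++ [st.1 ++ [c]])
  else (st.1 ++ [c], st.2.1 + 1, st.2.2)

-- Batching a list into blocks of k, dropping the trailing partial block.
def pvBatch (k : Int) (C : List String) : List (List String) :=
  if h : k.toNat ≤ C.length ∧ 0 < k.toNat then
    C.take k.toNat :: pvBatch k (C.drop k.toNat)
  else []
termination_by C.length
decreasing_by simp [List.length_drop]; omega

lemma pvBatch_nil_of_short (k : Int) (C : List String) (h : C.length < k.toNat) :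
    pvBatch k C = [] := by
  rw [pvBatch, dif_neg]; omega

lemma pvBatch_block (k : Int) (C1 C : List String) (h : C1.length = k.toNat)
    (hpos : 0 < k.toNat) : pvBatch k (C1 ++ C) = C1 :: pvBatch k C := by
  rw [pvBatch, dif_pos ⟨by simp; omega, hpos⟩, List.take_left' h, List.drop_left' h]

lemma pyRange_pos_nil (a b s : Int) (hs : 0 < s) (h : b ≤ a) :
    PySem.List.pyRange a b s = [] := by
  rw [PySem.List.pyRange_of_pos a b hs, if_neg (by omega)]; simp

lemma pyRange_neg_nil (a b s : Int) (hs : s < 0) (h : a ≤ b) :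
    PySem.List.pyRange a b s = [] := by
  simp only [PySem.List.pyRange, if_neg (show ¬ s = 0 by omega), if_neg (show ¬ 0 < s by omega),
    if_neg (show ¬ b < a by omega)]
  simp

lemma pyRange_pos_cons (a b s : Int) (hs : 0 < s) (hab : a < b) :
    PySem.List.pyRange a b s = a :: PySem.List.pyRange (a + s) b s := by
  rw [PySem.List.pyRange_of_pos a b hs, PySem.List.pyRange_of_pos (a + s) b hs,
    if_pos hab]
  by_cases h2 : a + s < b
  · rw [if_pos h2]
    have e1 : b - a + s - 1 = (b - (a + s) + s - 1) + 1 * s := by ring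
    have e2 : (b - a + s - 1) / s = (b - (a + s) + s - 1) / s + 1 := by
      rw [e1, Int.add_mul_ediv_right _ _ (show s ≠ 0 by omega)]
    have hnn : 0 ≤ (b - (a + s) + s - 1) / s :=
      Int.ediv_nonneg (by omega) (by omega)
    have e3 : ((b - a + s - 1) / s).toNat = ((b - (a + s) + s - 1) / s).toNat + 1 := by omega
    rw [e3, List.range_succ_eq_map, List.map_cons, List.map_map]
    simp only [List.cons.injEq]
    refine ⟨by simp, List.map_congr_left ?_⟩
    intro x _
    simp only [Function.comp_apply]
    push_cast
    ring
  · rw [if_neg h2]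
    have e1 : b - a + s - 1 = (b - a - 1) + 1 * s := by ring
    have e2 : (b - a - 1) / s = 0 := Int.ediv_eq_zero_of_lt (by omega) (by omega)
    have e3 : (b - a + s - 1) / s = 1 := by
      rw [e1, Int.add_mul_ediv_right _ _ (show s ≠ 0 by omega), e2]
      norm_num
    rw [e3]
    simp

lemma pyRange_pos_shift (a b s : Int) (hs : 0 < s) :
    PySem.List.pyRange (a + s) b s = (PySem.List.pyRange a (b - s) s).map (· + s) := by
  rw [PySem.List.pyRange_of_pos (a + s) b hs, PySem.List.pyRange_of_pos a (b - s) hs,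
    List.map_map]
  have hif : (a + s < b) = (a < b - s) := by
    apply propext; omega
  have hcount : b - (a + s) + s - 1 = b - s - a + s - 1 := by ring
  rw [hcount]
  simp only [hif]
  apply List.map_congr_left
  intro x _
  simp [Function.comp]; ring

lemma fold_neg (k : Int) (hk : k ≤ 0) :
    ∀ (C : List String) (cur : List String) (cnt : Int) (out : List (List String)),
      0 ≤ cnt → (C.foldl (pvStep k) (cur, cnt, out)).2.2 = out := by
  intro C
  induction C with
  | nil => intro cur cnt out _; rfl
  | cons c C ih =>
    intro cur cnt out hcnt
    simp only [List.foldl_cons, pvStep, if_neg (show ¬ cnt + 1 = k by omega)]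
    exact ih _ _ _ (by omega)

lemma fold_pos (k : Int) (hk : 1 ≤ k) :
    ∀ (C cur : List String) (out : List (List String)), (cur.length : Int) < k →
      (C.foldl (pvStep k) (cur, (cur.length : Int), out)).2.2 = out ++ pvBatch k (cur ++ C) := by
  intro C
  induction C with
  | nil =>
    intro cur out hcur
    simp only [List.foldl_nil, List.append_nil]
    rw [pvBatch_nil_of_short k cur (by omega), List.append_nil]
  | cons c C ih =>
    intro cur out hcur
    by_cases hfull : (cur.length : Int) + 1 = k
    · have hlen : (cur ++ [c]).length = k.toNat := by simp; omega
      simp only [List.foldl_cons, pvStep, if_pos hfull]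
      have h0 : (0 : Int) = ((List.length ([] : List String) : Nat) : Int) := by simp
      rw [h0, ih [] (out ++ [cur ++ [c]]) (by simp; omega)]
      have hsplit : cur ++ c :: C = (cur ++ [c]) ++ C := by simp
      rw [hsplit, pvBatch_block k (cur ++ [c]) C hlen (by omega), List.nil_append]
      simp
    · have hc : (cur.length : Int) + 1 < k := by omega
      simp only [List.foldl_cons, pvStep, if_neg hfull]
      have hlen : ((cur.length : Int) + 1) = (((cur ++ [c]).length : Nat) : Int) := by
        simp
      rw [hlen, ih (cur ++ [c]) out (by simp; omega)]
      simp

lemma mod_lemmas (n k : Int) (hk : 1 ≤ k) (hn : 0 ≤ n) (hkn : k ≤ n) :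
    k ≤ n - n % k := by
  have h1 : n % k = n - k * (n / k) := by
    rw [Int.emod_def]
  have h2 : 1 ≤ n / k := by
    have := Int.ediv_le_ediv (show 0 < k by omega) hkn
    rwa [Int.ediv_self (show k ≠ 0 by omega)] at this
  nlinarith

lemma slice_batch (k : Int) (hk : 1 ≤ k) :
    ∀ (m : Nat) (C : List String), C.length = m →
      (PySem.List.pyRange 0 ((C.length : Int) - (C.length : Int) % k) k).map
        (fun j => PySem.List.slice C (some j) (some (j + k))) = pvBatch k C := by
  intro m
  induction m using Nat.strong_induction_on with
  | _ m ih =>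
    intro C hC
    by_cases hshort : (C.length : Int) < k
    · have hmod : (C.length : Int) % k = (C.length : Int) :=
        Int.emod_eq_of_lt (by positivity) hshort
      rw [hmod, sub_self, pyRange_pos_nil 0 0 k (by omega) le_rfl, List.map_nil,
        pvBatch_nil_of_short k C (by omega)]
    · have hkn : k ≤ (C.length : Int) := by omega
      have hm0 : 0 ≤ (C.length : Int) % k := Int.emod_nonneg _ (by omega)
      have hbound : k ≤ (C.length : Int) - (C.length : Int) % k :=
        mod_lemmas _ k hk (by positivity) hkn
      rw [pyRange_pos_cons 0 _ k (by omega) (by omega), List.map_cons,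
        pyRange_pos_shift 0 _ k (by omega), List.map_map, zero_add]
      have hhead : PySem.List.slice C (some 0) (some k) = C.take k.toNat := by
        rw [PySem.List.slice_toNat C le_rfl (by omega)]
        simp
      set C' := C.drop k.toNat with hC'
      have hlenC' : (C'.length : Int) = (C.length : Int) - k := by
        simp [hC']; omega
      have hmod' : (C'.length : Int) % k = (C.length : Int) % k := by
        rw [hlenC']; exact Int.sub_emod_right _ _
      have hIH := ih C'.length (by simp [hC']; omega) C' rfl
      have hrange : (C.length : Int) - (C.length : Int) % k - k
          = (C'.length : Int) - (C'.length : Int) % k := by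
        rw [hlenC', Int.sub_emod_right]; ring
      have htail : ∀ j ∈ PySem.List.pyRange 0 ((C.length : Int) - (C.length : Int) % k - k) k,
          ((fun j => PySem.List.slice C (some j) (some (j + k))) ∘ (· + k)) j
            = PySem.List.slice C' (some j) (some (j + k)) := by
        intro j hj
        have hj0 : 0 ≤ j := by
          have := (PySem.List.mem_pyRange_iff_of_pos (show (0:Int) < k by omega) j).mp hj
          omega
        simp only [Function.comp]
        rw [PySem.List.slice_toNat C (by omega) (by omega),
          PySem.List.slice_toNat C' (by omega) (by omega)]
        have hd : C.drop (j + k).toNat = C'.drop j.toNat := by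
          rw [hC', List.drop_drop]
          congr 1; omega
        rw [hd]
        congr 1
        omega
      have hunfold : pvBatch k C = List.take k.toNat C :: pvBatch k (List.drop k.toNat C) := by
        rw [pvBatch, dif_pos ⟨by omega, by omega⟩]
      rw [List.map_congr_left htail, hrange, hIH, hhead, hunfold, ← hC']

lemma int_mod_eq_emod (n k : Int) (hk : 0 < k) : PySem.Int.mod n k = n % k := by
  simp only [PySem.Int.mod, Int.fmod_eq_emod, if_pos (Or.inl (le_of_lt hk))]
  ring

-- ===== VERDICT (by name: the statement is the Claim_ definition above) =====
theorem slice_corpus_generator_spec : Claim_equal_slice_corpus_generator := by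
  intro corpus cs k _ hpre
  unfold Spec_slice_corpus_generator slice_corpus_generator slice_corpus_generator_alt
  simp only []
  set ws := PySem.Str.split₀ corpus with hws
  set f := fun i => PySem.Str.join " " (PySem.List.slice ws (some i) (some (i + cs))) with hf
  by_cases hcs : 0 < cs
  · -- fold over the index range = fold of pvStep over the mapped chunk list
    have hfold : ((PySem.List.pyRange 0 (ws.length : Int) cs).foldl
        (fun st i =>
          let chunk := PySem.Str.join " " (PySem.List.slice ws (some i) (some (i + cs)))
          let chunks := st.1 ++ [chunk]
          let counter := st.2.1 + 1
          if counter = k then (([] : List String), (0 : Int), st.2.2 ++ [chunks])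
          else (chunks, counter, st.2.2))
        (([] : List String), (0 : Int), ([] : List (List String))))
        = (((PySem.List.pyRange 0 (ws.length : Int) cs).map f).foldl (pvStep k)
            (([] : List String), (0 : Int), ([] : List (List String)))) := by
      rw [List.foldl_map]
      rfl
    rw [hfold]
    set C := (PySem.List.pyRange 0 (ws.length : Int) cs).map f with hCdef
    by_cases hk : 1 ≤ k
    · have hA := fold_pos k hk C [] [] (by simp; omega)
      simp only [List.length_nil, Nat.cast_zero, List.nil_append] at hA
      rw [hA, if_pos (by omega), int_mod_eq_emod _ k (by omega),
        slice_batch k hk C.length C rfl]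
    · rw [fold_neg k (by omega) C [] 0 [] le_rfl, if_neg (by omega)]
  · have hneg : cs < 0 := by
      rcases lt_or_ge cs 0 with h | h
      · exact h
      · exfalso; exact hpre (by omega)
    have hr : PySem.List.pyRange 0 (ws.length : Int) cs = [] :=
      pyRange_neg_nil 0 _ cs hneg (by positivity)
    rw [hr]
    simp only [List.foldl_nil, List.map_nil]
    by_cases hk : k > 0
    · rw [if_pos hk]
      have : PySem.Int.mod ((List.length ([] : List String) : Nat) : Int) k = 0 := by
        rw [int_mod_eq_emod _ k hk]; simp
      simp only [List.length_nil, Int.natCast_zero] at this ⊢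
      rw [this, sub_zero, pyRange_pos_nil 0 0 k hk le_rfl, List.map_nil]
    · rw [if_neg hk]
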